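-- pv_equiv track=rewrite | github.com/SylvainDe/aoc | python/2015/day17.py | get_nb_ways2
-- ===== SOURCE A (Python) =====
-- import collections
--
-- def get_nb_ways2(volume, containers):
--     ways = collections.Counter([(volume, 0)])
--     for c in sorted(containers):
--         for (rem_vol, nb_container), count in list(ways.items()):
--             vol2 = rem_vol - c
--             if vol2 >= 0:
--                 ways[(vol2, nb_container + 1)] += count
--     min_cont = min(
--         nb_container for rem_vol, nb_container in ways.keys() if rem_vol == 0
--     )
--     return ways[(0, min_cont)]
-- ===== SOURCE B (Python) =====
-- def get_nb_ways2(volume, containers):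
--     # One dict keyed by remaining volume only, each entry holding
--     # (min containers used, number of ways achieving that min).
--     best = {volume: (0, 1)}
--     for c in sorted(containers):
--         for rem, (k, cnt) in list(best.items()):
--             r2 = rem - c
--             if r2 >= 0:
--                 if r2 in best:
--                     k2, cnt2 = best[r2]
--                     if k + 1 < k2:
--                         best[r2] = (k + 1, cnt)
--                     elif k + 1 == k2:
--                         best[r2] = (k2, cnt2 + cnt)
--                 else:
--                     best[r2] = (k + 1, cnt)
--     return best[0][1]
-- ===== Notes on version B (the rewrite author's own statement) =====
-- stated objective: faster
-- what changed: Keeps the sorted pass (the >=0 pruning is order-sensitive) but replaces A's Counter keyed by (remaining volume, containers used) pairs plus the final min-scan over keys by a dict keyed by remaining volume alone whose entries carry (min containers, count at that min), shrinking the state space from O(V*n) to O(V) and removing the final scan.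
import Mathlib
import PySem

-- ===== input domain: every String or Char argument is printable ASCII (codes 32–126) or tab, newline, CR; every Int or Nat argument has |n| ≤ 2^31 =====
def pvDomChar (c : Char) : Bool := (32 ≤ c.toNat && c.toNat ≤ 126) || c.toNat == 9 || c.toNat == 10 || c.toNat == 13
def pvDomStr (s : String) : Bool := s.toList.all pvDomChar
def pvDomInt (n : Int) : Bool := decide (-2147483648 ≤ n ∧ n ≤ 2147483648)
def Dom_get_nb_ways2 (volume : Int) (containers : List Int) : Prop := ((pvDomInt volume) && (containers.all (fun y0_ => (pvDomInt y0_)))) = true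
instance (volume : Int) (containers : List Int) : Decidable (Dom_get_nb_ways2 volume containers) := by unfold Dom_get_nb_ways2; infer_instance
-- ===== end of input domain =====

-- B replaces A's Counter over (remainder, size) pairs and final min-scan by a single dict keyed
-- by remainder alone holding (min size, count); same sorted pass, measured faster.


-- ===== PORT A =====
-- the inner `for (rem_vol, nb_container), count in list(ways.items()):` loop of A
def pvStepA (c : Int) (w : PySem.Dict (Int × Int) Int) : PySem.Dict (Int × Int) Int :=
  w.items.foldl (fun w2 it =>
    let vol2 := it.1.1 - c
    if 0 ≤ vol2 then w2.modify (vol2, it.1.2 + 1) 0 (· + it.2) else w2) w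

-- ways = collections.Counter([(volume, 0)]); for c in sorted(containers): <pvStepA>;
-- min_cont = min(nb for (rem, nb) in ways.keys() if rem == 0); return ways[(0, min_cont)]
def get_nb_ways2 (volume : Int) (containers : List Int) : Int :=
  let ways0 : PySem.Dict (Int × Int) Int := PySem.Dict.counter [(volume, (0 : Int))]
  let ways := (PySem.List.sorted containers (fun x => x)).foldl (fun w c => pvStepA c w) ways0
  let zeros := (ways.keys.filter (fun p => p.1 == 0)).map (·.2)
  match PySem.List.min? zeros (fun y => y) with
  | some m => ways.getD (0, m) 0
  | none => 0   -- Python: min() of an empty generator raises ValueError (B's KeyError set is identical)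

-- ===== PORT B =====
-- the inner `for rem, (k, cnt) in list(best.items()):` loop of B
def pvStepB (c : Int) (b : PySem.Dict Int (Int × Int)) : PySem.Dict Int (Int × Int) :=
  b.items.foldl (fun b2 it =>
    let r2 := it.1 - c
    if 0 ≤ r2 then
      match b2.get? r2 with
      | some kc =>
        if it.2.1 + 1 < kc.1 then b2.insert r2 (it.2.1 + 1, it.2.2)
        else if it.2.1 + 1 == kc.1 then b2.insert r2 (kc.1, kc.2 + it.2.2)
        else b2
      | none => b2.insert r2 (it.2.1 + 1, it.2.2)
    else b2) b

-- best = {volume: (0, 1)}; for c in sorted(containers): <pvStepB>; return best[0][1]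
def get_nb_ways2_alt (volume : Int) (containers : List Int) : Int :=
  let best0 : PySem.Dict Int (Int × Int) := PySem.Dict.empty.insert volume (0, 1)
  let best := (PySem.List.sorted containers (fun x => x)).foldl (fun b c => pvStepB c b) best0
  match best.get? 0 with
  | some kc => kc.2
  | none => 0   -- Python: best[0] raises KeyError exactly where A raises ValueError

-- ===== PRECONDITION & SPEC =====
-- Pre_ excludes exactly the inputs on which A raises ValueError (and B raises KeyError): those
-- where no subset of the containers, taken in sorted order with the loop's `>= 0` pruning (the
-- running remainder never dips below zero), sums to the volume.
def Pre_get_nb_ways2 (volume : Int) (containers : List Int) : Prop :=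
  ∃ s ∈ (PySem.List.sorted containers (fun x => x)).sublists,
    s.sum = volume ∧ ∀ j : Nat, j < s.length → 0 ≤ volume - (s.take (j + 1)).sum
instance (volume : Int) (containers : List Int) : Decidable (Pre_get_nb_ways2 volume containers) := by
  unfold Pre_get_nb_ways2; infer_instance

def pvWitness_get_nb_ways2 : Int × List Int := (25, [20, 15, 10, 5, 5])

def Spec_get_nb_ways2 (volume : Int) (containers : List Int) (out : Int) : Prop := out = get_nb_ways2_alt volume containers
instance (volume : Int) (containers : List Int) (out : Int) : Decidable (Spec_get_nb_ways2 volume containers out) := by unfold Spec_get_nb_ways2; infer_instance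

-- ===== CLAIM (what is proved, stated in full; the proofs are below) =====
def Claim_equal_get_nb_ways2 : Prop := ∀ (volume : Int) (containers : List Int), Dom_get_nb_ways2 volume containers → Pre_get_nb_ways2 volume containers → Spec_get_nb_ways2 volume containers (get_nb_ways2 volume containers)

-- ===== LEMMAS AND PROOFS =====

-- ghost count: pvG v P r k = number of ways the loops over P, pruning at negative remainders,
-- reach the state (remaining volume r, containers used k) starting from (v, 0)
def pvGbase (v : Int) : Int → Int → Nat := fun r k => if r = v ∧ k = 0 then 1 else 0

def pvGstep (c : Int) (f : Int → Int → Nat) : Int → Int → Nat :=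
  fun r k => f r k + (if 0 ≤ r then f (r + c) (k - 1) else 0)

def pvG (v : Int) (P : List Int) : Int → Int → Nat :=
  P.foldl (fun f c => pvGstep c f) (pvGbase v)

theorem pvG_append (v : Int) (P : List Int) (c : Int) :
    pvG v (P ++ [c]) = pvGstep c (pvG v P) := by
  unfold pvG
  rw [List.foldl_append]
  rfl

theorem pvG_k_neg (v : Int) (P : List Int) : ∀ r k : Int, k < 0 → pvG v P r k = 0 := by
  induction P using List.reverseRecOn with
  | nil =>
    intro r k hk
    show pvGbase v r k = 0
    unfold pvGbase
    rw [if_neg (by omega)]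
  | append_singleton P c ih =>
    intro r k hk
    rw [pvG_append]
    unfold pvGstep
    rw [ih r k hk, ih (r + c) (k - 1) (by omega)]
    simp

theorem pvG_k_large (v : Int) (P : List Int) :
    ∀ r k : Int, (P.length : Int) < k → pvG v P r k = 0 := by
  induction P using List.reverseRecOn with
  | nil =>
    intro r k hk
    show pvGbase v r k = 0
    unfold pvGbase
    rw [if_neg (by simp at hk; omega)]
  | append_singleton P c ih =>
    intro r k hk
    simp only [List.length_append, List.length_singleton] at hk
    rw [pvG_append]
    unfold pvGstep
    rw [ih r k (by push_cast at hk ⊢; omega), ih (r + c) (k - 1) (by push_cast at hk ⊢; omega)]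
    simp

-- decomposing a sublist of P ++ [c]

theorem pvSublistConcat {s P : List Int} {c : Int} :
    s.Sublist (P ++ [c]) ↔ s.Sublist P ∨ ∃ t, s = t ++ [c] ∧ t.Sublist P := by
  constructor
  · intro h
    have h' : s.reverse.Sublist (c :: P.reverse) := by
      simpa [List.reverse_append] using List.reverse_sublist.mpr h
    rcases List.sublist_cons_iff.mp h' with h2 | ⟨r, hr, hrs⟩
    · exact Or.inl (List.reverse_sublist.mp h2)
    · right
      refine ⟨r.reverse, ?_, ?_⟩
      · have := congrArg List.reverse hr
        simpa using this
      · apply List.reverse_sublist.mp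
        simpa using hrs
  · rintro (h | ⟨t, rfl, ht⟩)
    · exact h.trans (List.sublist_append_left P [c])
    · exact ht.append (List.Sublist.refl [c])

-- 0 < pvG v P r k exactly when some sorted-order subset reaches the state (r, k) without the
-- running remainder ever dipping below zero
theorem pvG_pos_iff (v : Int) (P : List Int) : ∀ r k : Int,
    0 < pvG v P r k ↔ ∃ s : List Int, s.Sublist P ∧ s.sum = v - r ∧ (s.length : Int) = k ∧
      ∀ j : Nat, j < s.length → 0 ≤ v - (s.take (j + 1)).sum := by
  induction P using List.reverseRecOn with
  | nil =>
    intro r k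
    show 0 < pvGbase v r k ↔ _
    unfold pvGbase
    constructor
    · intro h
      split at h
      · next hc => exact ⟨[], List.Sublist.refl [], by simp; omega, by simp [hc.2], by simp⟩
      · omega
    · rintro ⟨s, hs, hsum, hlen, _⟩
      rw [List.sublist_nil] at hs
      subst hs
      simp only [List.sum_nil] at hsum
      simp only [List.length_nil, Nat.cast_zero] at hlen
      rw [if_pos ⟨by omega, hlen.symm⟩]
      omega
  | append_singleton P c ih =>
    intro r k
    rw [pvG_append]
    unfold pvGstep
    constructor
    · intro h
      by_cases h1 : 0 < pvG v P r k
      · obtain ⟨s, hs, hsum, hlen, hpref⟩ := (ih r k).mp h1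
        exact ⟨s, hs.trans (List.sublist_append_left P [c]), hsum, hlen, hpref⟩
      · have hr : 0 ≤ r := by
          by_contra hc
          rw [if_neg hc] at h
          omega
        have h2 : 0 < pvG v P (r + c) (k - 1) := by
          rw [if_pos hr] at h
          omega
        obtain ⟨t, ht, hsum, hlen, hpref⟩ := (ih (r + c) (k - 1)).mp h2
        refine ⟨t ++ [c], ht.append (List.Sublist.refl [c]), ?_, ?_, ?_⟩
        · simp only [List.sum_append, List.sum_singleton]
          omega
        · simp only [List.length_append, List.length_singleton]
          push_cast
          omega
        · intro j hj
          simp only [List.length_append, List.length_singleton] at hj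
          by_cases hjt : j < t.length
          · rw [List.take_append_of_le_length (by omega)]
            exact hpref j hjt
          · have hfull : (t ++ [c]).take (j + 1) = t ++ [c] :=
              List.take_of_length_le (by simp; omega)
            rw [hfull]
            simp only [List.sum_append, List.sum_singleton]
            omega
    · rintro ⟨s, hs, hsum, hlen, hpref⟩
      rcases pvSublistConcat.mp hs with h1 | ⟨t, rfl, ht⟩
      · have := (ih r k).mpr ⟨s, h1, hsum, hlen, hpref⟩
        split_ifs <;> omega
      · have hts : (t ++ [c]).sum = t.sum + c := by simp
        have hr : 0 ≤ r := by
          have hj := hpref t.length (by simp)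
          rw [List.take_of_length_le (by simp)] at hj
          omega
        have h2 : 0 < pvG v P (r + c) (k - 1) := by
          apply (ih (r + c) (k - 1)).mpr
          refine ⟨t, ht, by omega, ?_, ?_⟩
          · simp only [List.length_append, List.length_singleton] at hlen
            push_cast at hlen ⊢
            omega
          · intro j hj
            have := hpref j (by simp; omega)
            rwa [List.take_append_of_le_length (by omega)] at this
        rw [if_pos hr]
        omega

-- ---------- generic facts about association lists with distinct keys ----------

theorem pvKeyInj {α β : Type} [DecidableEq α] {l : List (α × β)} (h : (l.map Prod.fst).Nodup)
    {a b : α × β} (ha : a ∈ l) (hb : b ∈ l) (hab : a.1 = b.1) : a = b := by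
  induction l with
  | nil => cases ha
  | cons x l ih =>
    simp only [List.map_cons, List.nodup_cons] at h
    simp only [List.mem_cons] at ha hb
    rcases ha with rfl | ha <;> rcases hb with rfl | hb
    · rfl
    · exact absurd (hab ▸ List.mem_map_of_mem hb) h.1
    · exact absurd (hab.symm ▸ List.mem_map_of_mem ha) h.1
    · exact ih h.2 ha hb

theorem pvFilterKey {α β : Type} [DecidableEq α] [BEq α] [LawfulBEq α] {l : List (α × β)}
    (h : (l.map Prod.fst).Nodup) {s : α} {v : β} (hm : (s, v) ∈ l) :
    l.filter (fun it => it.1 == s) = [(s, v)] := by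
  induction l with
  | nil => cases hm
  | cons x l ih =>
    simp only [List.map_cons, List.nodup_cons] at h
    simp only [List.mem_cons] at hm
    rcases hm with rfl | hm
    · have hnil : l.filter (fun it => it.1 == s) = [] := by
        rw [List.filter_eq_nil_iff]
        intro a ha hbeq
        have hmem : a.1 ∈ l.map Prod.fst := List.mem_map_of_mem ha
        rw [eq_of_beq hbeq] at hmem
        exact h.1 hmem
      simp [hnil]
    · have hne : (x.1 == s) = false := by
        rcases hbeq : x.1 == s with _ | _
        · rfl
        · have hmem : (s, v).1 ∈ l.map Prod.fst := List.mem_map_of_mem hm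
          rw [← eq_of_beq hbeq] at hmem
          exact absurd hmem h.1
      simp [hne, ih h.2 hm]

theorem pvFilterKey_none {α β : Type} [DecidableEq α] [BEq α] [LawfulBEq α] {l : List (α × β)}
    {s : α} (hm : ∀ v, (s, v) ∉ l) :
    l.filter (fun it => it.1 == s) = [] := by
  rw [List.filter_eq_nil_iff]
  intro a ha hbeq
  have hae : a = (s, a.2) := Prod.ext (eq_of_beq hbeq) rfl
  exact hm a.2 (by rwa [← hae])

-- keys are the first components of items
theorem pvKeysEq {κ ν : Type} (d : PySem.Dict κ ν) : d.keys = d.items.map Prod.fst := rfl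

-- sum of the values of the items at key s is the lookup (keys distinct)
theorem pvSumFilterItems (d : PySem.Dict (Int × Int) Int) (hnd : d.keys.Nodup) (s : Int × Int) :
    ((d.items.filter (fun it => it.1 == s)).map (·.2)).sum = d.getD s 0 := by
  rw [pvKeysEq] at hnd
  cases hg : d.get? s with
  | none =>
    have hno : ∀ v, (s, v) ∉ d.items := by
      intro v hv
      have := (PySem.Dict.get?_eq_some_iff_mem_items d s v hnd).mpr hv
      rw [hg] at this; cases this
    rw [pvFilterKey_none hno]
    simp [PySem.Dict.getD_eq_get?_getD, hg]
  | some v =>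
    rw [pvFilterKey hnd (PySem.Dict.mem_items_of_get?_eq_some d hg)]
    simp [PySem.Dict.getD_eq_get?_getD, hg]

-- find? at key s is the lookup (keys distinct)
theorem pvFindKey (d : PySem.Dict Int (Int × Int)) (hnd : d.keys.Nodup) (s : Int) :
    d.items.find? (fun it => it.1 == s) = (d.get? s).map (fun v => (s, v)) := by
  rw [pvKeysEq] at hnd
  cases hg : d.get? s with
  | none =>
    simp only [Option.map_none]
    rw [List.find?_eq_none]
    intro x hx hbeq
    have hx' : x = (s, x.2) := Prod.ext (eq_of_beq hbeq) rfl
    have := (PySem.Dict.get?_eq_some_iff_mem_items d s x.2 hnd).mpr (hx' ▸ hx)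
    rw [hg] at this; cases this
  | some v =>
    have hmem : (s, v) ∈ d.items := PySem.Dict.mem_items_of_get?_eq_some d hg
    cases hf : d.items.find? (fun it => it.1 == s) with
    | none =>
      rw [List.find?_eq_none] at hf
      exact absurd (by simp : ((s, v).1 == s) = true) (hf _ hmem)
    | some it =>
      have h1 := List.find?_some hf
      have h2 := List.mem_of_find?_eq_some hf
      have : it = (s, v) := pvKeyInj hnd h2 hmem (eq_of_beq h1)
      simp [this]

-- ---------- A side: pointwise characterisation of the inner loop ----------

theorem pvStepA_fold_getD (c : Int) (I : List ((Int × Int) × Int)) (d : PySem.Dict (Int × Int) Int)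
    (q : Int × Int) :
    ((I.foldl (fun w2 it =>
        let vol2 := it.1.1 - c
        if 0 ≤ vol2 then w2.modify (vol2, it.1.2 + 1) 0 (· + it.2) else w2) d).getD q 0)
      = d.getD q 0 +
        ((I.filter (fun it => decide (0 ≤ it.1.1 - c) && ((it.1.1 - c, it.1.2 + 1) == q))).map (·.2)).sum := by
  induction I generalizing d with
  | nil => simp
  | cons it I ih =>
    simp only [List.foldl_cons, List.filter_cons]
    by_cases hg : 0 ≤ it.1.1 - c
    · rw [if_pos hg]
      by_cases hq : (it.1.1 - c, it.1.2 + 1) = q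
      · have hp : (decide (0 ≤ it.1.1 - c) && ((it.1.1 - c, it.1.2 + 1) == q)) = true := by
          rw [decide_eq_true hg, beq_iff_eq.mpr hq, Bool.and_self]
        rw [hp, if_pos rfl, ih, PySem.Dict.getD_modify, if_pos hq.symm, ← hq]
        simp only [List.map_cons, List.sum_cons]
        ring
      · have hp : (decide (0 ≤ it.1.1 - c) && ((it.1.1 - c, it.1.2 + 1) == q)) = false := by
          rw [beq_eq_false_iff_ne.mpr hq, Bool.and_false]
        rw [hp, if_neg (by simp), ih, PySem.Dict.getD_modify, if_neg (fun h => hq h.symm)]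
    · rw [if_neg hg]
      have hp : (decide (0 ≤ it.1.1 - c) && ((it.1.1 - c, it.1.2 + 1) == q)) = false := by
        rw [decide_eq_false hg, Bool.false_and]
      rw [hp, if_neg (by simp), ih]

theorem pvStepA_fold_mem (c : Int) (I : List ((Int × Int) × Int)) (d : PySem.Dict (Int × Int) Int)
    (q : Int × Int) :
    (q ∈ (I.foldl (fun w2 it =>
        let vol2 := it.1.1 - c
        if 0 ≤ vol2 then w2.modify (vol2, it.1.2 + 1) 0 (· + it.2) else w2) d).keys)
      ↔ q ∈ d.keys ∨ ∃ it ∈ I, 0 ≤ it.1.1 - c ∧ (it.1.1 - c, it.1.2 + 1) = q := by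
  induction I generalizing d with
  | nil => simp
  | cons it I ih =>
    simp only [List.foldl_cons]
    by_cases hg : 0 ≤ it.1.1 - c
    · rw [if_pos hg, ih]
      have hmm : q ∈ (d.modify (it.1.1 - c, it.1.2 + 1) 0 (· + it.2)).keys ↔
          q = (it.1.1 - c, it.1.2 + 1) ∨ q ∈ d.keys := by
        rw [PySem.Dict.keys_modify, PySem.Dict.mem_keys_insert]
      rw [hmm]
      simp only [List.mem_cons]
      constructor
      · rintro ((h | h) | ⟨it', h1, h2, h3⟩)
        · exact Or.inr ⟨it, Or.inl rfl, hg, h.symm⟩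
        · exact Or.inl h
        · exact Or.inr ⟨it', Or.inr h1, h2, h3⟩
      · rintro (h | ⟨it', h1 | h1, h2, h3⟩)
        · exact Or.inl (Or.inr h)
        · exact Or.inl (Or.inl (h1 ▸ h3.symm))
        · exact Or.inr ⟨it', h1, h2, h3⟩
    · rw [if_neg hg, ih]
      simp only [List.mem_cons]
      constructor
      · rintro (h | ⟨it', h1, h2, h3⟩)
        · exact Or.inl h
        · exact Or.inr ⟨it', Or.inr h1, h2, h3⟩
      · rintro (h | ⟨it', h1 | h1, h2, h3⟩)
        · exact Or.inl h
        · exact absurd (h1 ▸ h2) hg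
        · exact Or.inr ⟨it', h1, h2, h3⟩

theorem pvStepA_fold_nodup (c : Int) (I : List ((Int × Int) × Int)) (d : PySem.Dict (Int × Int) Int)
    (h : d.keys.Nodup) :
    ((I.foldl (fun w2 it =>
        let vol2 := it.1.1 - c
        if 0 ≤ vol2 then w2.modify (vol2, it.1.2 + 1) 0 (· + it.2) else w2) d).keys).Nodup := by
  induction I generalizing d with
  | nil => exact h
  | cons it I ih =>
    simp only [List.foldl_cons]
    by_cases hg : 0 ≤ it.1.1 - c
    · rw [if_pos hg]
      apply ih
      rw [PySem.Dict.keys_modify]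
      exact PySem.Dict.nodup_keys_insert _ _ _ h
    · rw [if_neg hg]; exact ih _ h

theorem pvStepA_getD (c : Int) (w : PySem.Dict (Int × Int) Int) (hnd : w.keys.Nodup) (q : Int × Int) :
    (pvStepA c w).getD q 0 = w.getD q 0 + (if 0 ≤ q.1 then w.getD (q.1 + c, q.2 - 1) 0 else 0) := by
  unfold pvStepA
  rw [pvStepA_fold_getD]
  congr 1
  by_cases hq1 : 0 ≤ q.1
  · rw [if_pos hq1, ← pvSumFilterItems w hnd (q.1 + c, q.2 - 1)]
    congr 1
    congr 1
    apply List.filter_congr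
    intro a _
    by_cases h : a.1 = (q.1 + c, q.2 - 1)
    · rw [h]
      have e1 : q.1 + c - c = q.1 := by ring
      have e2 : q.2 - 1 + 1 = q.2 := by ring
      rw [e1, e2]
      simp [hq1]
    · have hb1 : ((a.1.1 - c, a.1.2 + 1) == q) = false := by
        rw [beq_eq_false_iff_ne]
        intro hcontra
        apply h
        have h1 := congrArg Prod.fst hcontra
        have h2 := congrArg Prod.snd hcontra
        simp only at h1 h2
        exact Prod.ext (by omega) (by omega)
      rw [hb1, Bool.and_false, beq_eq_false_iff_ne.mpr h]
  · rw [if_neg hq1]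
    have hnil : (w.items.filter
        (fun it => decide (0 ≤ it.1.1 - c) && ((it.1.1 - c, it.1.2 + 1) == q))) = [] := by
      rw [List.filter_eq_nil_iff]
      intro a _ hp
      simp only [Bool.and_eq_true, decide_eq_true_eq, beq_iff_eq] at hp
      have := congrArg Prod.fst hp.2
      simp only at this
      exact hq1 (by omega)
    rw [hnil]
    rfl

theorem pvStepA_mem (c : Int) (w : PySem.Dict (Int × Int) Int) (q : Int × Int) :
    q ∈ (pvStepA c w).keys ↔ q ∈ w.keys ∨ (0 ≤ q.1 ∧ (q.1 + c, q.2 - 1) ∈ w.keys) := by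
  unfold pvStepA
  rw [pvStepA_fold_mem]
  apply or_congr Iff.rfl
  rw [pvKeysEq, List.mem_map]
  constructor
  · rintro ⟨it, hmem, hg, htgt⟩
    have h1 := congrArg Prod.fst htgt
    have h2 := congrArg Prod.snd htgt
    simp only at h1 h2
    exact ⟨by omega, it, hmem, Prod.ext (by omega) (by omega)⟩
  · rintro ⟨hq1, it, hmem, hkey⟩
    have h1 := congrArg Prod.fst hkey
    have h2 := congrArg Prod.snd hkey
    simp only at h1 h2
    exact ⟨it, hmem, by omega, Prod.ext (by omega) (by omega)⟩

-- ---------- A side: loop invariant ----------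

def pvInvA (v : Int) (done : List Int) (w : PySem.Dict (Int × Int) Int) : Prop :=
  w.keys.Nodup ∧
  (∀ q : Int × Int, w.getD q 0 = (pvG v done q.1 q.2 : Int)) ∧
  (∀ q : Int × Int, q ∈ w.keys ↔ 0 < pvG v done q.1 q.2)

theorem pvInvA_step (v : Int) (done : List Int) (w : PySem.Dict (Int × Int) Int) (c : Int)
    (h : pvInvA v done w) : pvInvA v (done ++ [c]) (pvStepA c w) := by
  obtain ⟨hnd, hgetD, hmem⟩ := h
  refine ⟨by unfold pvStepA; exact pvStepA_fold_nodup c w.items w hnd, ?_, ?_⟩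
  · intro q
    rw [pvStepA_getD c w hnd q, hgetD q, hgetD (q.1 + c, q.2 - 1), pvG_append]
    unfold pvGstep
    split_ifs <;> push_cast <;> ring
  · intro q
    rw [pvStepA_mem, hmem q, hmem (q.1 + c, q.2 - 1), pvG_append]
    unfold pvGstep
    split_ifs with hq1
    · simp only [hq1, true_and]
      omega
    · simp only [hq1, false_and, or_false]
      omega

theorem pvInvA_loop (v : Int) (L : List Int) :
    ∀ (done : List Int) (w : PySem.Dict (Int × Int) Int), pvInvA v done w →
      pvInvA v (done ++ L) (L.foldl (fun w c => pvStepA c w) w) := by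
  induction L with
  | nil => intro done w h; simpa using h
  | cons c L ih =>
    intro done w h
    have h1 : pvInvA v (done ++ [c]) (pvStepA c w) := pvInvA_step v done w c h
    have := ih (done ++ [c]) (pvStepA c w) h1
    simpa [List.append_assoc] using this

theorem pvInvA_init (v : Int) : pvInvA v [] (PySem.Dict.counter [(v, (0 : Int))]) := by
  refine ⟨PySem.Dict.nodup_keys_counter _, ?_, ?_⟩
  · intro q
    rw [PySem.Dict.getD_counter]
    show _ = ((pvGbase v q.1 q.2 : Nat) : Int)
    unfold pvGbase
    by_cases h : q = (v, 0)
    · rw [h]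
      simp
    · have hb : (((v : Int), (0 : Int)) == q) = false := by
        rw [beq_eq_false_iff_ne]; exact fun he => h he.symm
      simp only [List.count_singleton, hb]
      rw [if_neg (show ¬(q.1 = v ∧ q.2 = 0) from fun hc => h (Prod.ext hc.1 hc.2))]
      rfl
  · intro q
    rw [PySem.Dict.keys_counter]
    have hset : PySem.Set.ofList [((v : Int), (0 : Int))] = [(v, 0)] := rfl
    rw [hset]
    show _ ↔ 0 < pvGbase v q.1 q.2
    unfold pvGbase
    simp only [List.mem_singleton]
    constructor
    · rintro rfl
      simp
    · intro h2
      split at h2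
      · next hcond => exact Prod.ext hcond.1 hcond.2
      · omega

-- ---------- B side: least index with a positive count, and the dict value spec ----------

def pvLeastK (v : Int) (P : List Int) (r : Int) : Option Nat :=
  (List.range (P.length + 1)).find? (fun k => decide (0 < pvG v P r (k : Int)))

def pvSpecB (v : Int) (P : List Int) (r : Int) : Option (Int × Int) :=
  (pvLeastK v P r).map (fun m => ((m : Int), (pvG v P r (m : Int) : Int)))

theorem pvLeastK_none_iff (v : Int) (P : List Int) (r : Int) :
    pvLeastK v P r = none ↔ ∀ k : Nat, pvG v P r (k : Int) = 0 := by
  unfold pvLeastK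
  rw [List.find?_eq_none]
  constructor
  · intro h k
    by_cases hk : k < P.length + 1
    · have := h k (List.mem_range.mpr hk)
      simpa using this
    · exact pvG_k_large v P r (k : Int) (by omega)
  · intro h x hx
    simp [h x]

theorem pvLeastK_some_iff (v : Int) (P : List Int) (r : Int) (m : Nat) :
    pvLeastK v P r = some m ↔
      0 < pvG v P r (m : Int) ∧ ∀ j : Nat, j < m → pvG v P r (j : Int) = 0 := by
  unfold pvLeastK
  rw [List.find?_eq_some_iff_getElem]
  constructor
  · rintro ⟨hp, i, hi, heq, hbefore⟩
    have hie : i = m := by simpa using heq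
    subst hie
    refine ⟨by simpa using hp, ?_⟩
    intro j hj
    have := hbefore j hj
    simp only [List.getElem_range] at this
    simpa using this
  · rintro ⟨hpos, hzero⟩
    have hm : m < P.length + 1 := by
      by_contra hcon
      have : (P.length : Int) < (m : Int) := by omega
      rw [pvG_k_large v P r (m : Int) this] at hpos
      omega
    refine ⟨by simpa using hpos, m, by simpa using hm, by simp, ?_⟩
    intro j hj
    simp [List.getElem_range, hzero j hj]

def pvMerge (o : Option (Int × Int)) (p : Int × Int) : Int × Int :=
  match o with
  | none => p
  | some kc => if p.1 < kc.1 then p else if p.1 = kc.1 then (kc.1, kc.2 + p.2) else kc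

theorem pvSpecB_append_neg (v : Int) (P : List Int) (c r : Int) (hr : ¬ 0 ≤ r) :
    pvSpecB v (P ++ [c]) r = pvSpecB v P r := by
  have hsame : ∀ k : Nat, pvG v (P ++ [c]) r (k : Int) = pvG v P r (k : Int) := by
    intro k
    rw [pvG_append]
    unfold pvGstep
    rw [if_neg hr]
    omega
  cases hf : pvLeastK v P r with
  | none =>
    have hfz := (pvLeastK_none_iff v P r).mp hf
    have : pvLeastK v (P ++ [c]) r = none :=
      (pvLeastK_none_iff v (P ++ [c]) r).mpr (fun k => by rw [hsame k, hfz k])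
    simp [pvSpecB, this, hf]
  | some mf =>
    obtain ⟨hf1, hf2⟩ := (pvLeastK_some_iff v P r mf).mp hf
    have hL : pvLeastK v (P ++ [c]) r = some mf :=
      (pvLeastK_some_iff v (P ++ [c]) r mf).mpr
        ⟨by rw [hsame mf]; exact hf1, fun j hj => by rw [hsame j]; exact hf2 j hj⟩
    simp [pvSpecB, hL, hf, hsame mf]

theorem pvSpecB_append (v : Int) (P : List Int) (c r : Int) (hr : 0 ≤ r) :
    pvSpecB v (P ++ [c]) r =
      match pvSpecB v P (r + c) with
      | none => pvSpecB v P r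
      | some kc => some (pvMerge (pvSpecB v P r) (kc.1 + 1, kc.2)) := by
  have h0 : pvG v (P ++ [c]) r (((0 : Nat) : Int)) = pvG v P r (((0 : Nat) : Int)) := by
    rw [pvG_append]
    unfold pvGstep
    rw [if_pos hr, pvG_k_neg v P (r + c) (((0 : Nat) : Int) - 1) (by simp)]
    omega
  have hS : ∀ j : Nat, pvG v (P ++ [c]) r ((j + 1 : Nat) : Int)
      = pvG v P r ((j + 1 : Nat) : Int) + pvG v P (r + c) ((j : Nat) : Int) := by
    intro j
    rw [pvG_append]
    unfold pvGstep
    rw [if_pos hr]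
    congr 2
    push_cast
    ring
  cases hg : pvLeastK v P (r + c) with
  | none =>
    have hgz := (pvLeastK_none_iff v P (r + c)).mp hg
    have hsame : ∀ k : Nat, pvG v (P ++ [c]) r (k : Int) = pvG v P r (k : Int) := by
      intro k
      cases k with
      | zero => exact h0
      | succ j => rw [hS j, hgz j]; omega
    have hg2 : pvSpecB v P (r + c) = none := by simp [pvSpecB, hg]
    rw [hg2]
    cases hf : pvLeastK v P r with
    | none =>
      have hfz := (pvLeastK_none_iff v P r).mp hf
      have : pvLeastK v (P ++ [c]) r = none :=
        (pvLeastK_none_iff v (P ++ [c]) r).mpr (fun k => by rw [hsame k, hfz k])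
      simp [pvSpecB, this, hf]
    | some mf =>
      obtain ⟨hf1, hf2⟩ := (pvLeastK_some_iff v P r mf).mp hf
      have hL : pvLeastK v (P ++ [c]) r = some mf :=
        (pvLeastK_some_iff v (P ++ [c]) r mf).mpr
          ⟨by rw [hsame mf]; exact hf1, fun j hj => by rw [hsame j]; exact hf2 j hj⟩
      simp [pvSpecB, hL, hf, hsame mf]
  | some mg =>
    obtain ⟨hg1, hg2⟩ := (pvLeastK_some_iff v P (r + c) mg).mp hg
    have hgs : pvSpecB v P (r + c) = some ((mg : Int), (pvG v P (r + c) (mg : Int) : Int)) := by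
      simp [pvSpecB, hg]
    rw [hgs]
    cases hf : pvLeastK v P r with
    | none =>
      have hfz := (pvLeastK_none_iff v P r).mp hf
      have hL : pvLeastK v (P ++ [c]) r = some (mg + 1) := by
        refine (pvLeastK_some_iff v (P ++ [c]) r (mg + 1)).mpr ⟨?_, ?_⟩
        · rw [hS mg, hfz (mg + 1)]; omega
        · intro j hj
          cases j with
          | zero => rw [h0]; exact hfz 0
          | succ jj => rw [hS jj, hfz (jj + 1), hg2 jj (by omega)]
      have hV : pvG v (P ++ [c]) r ((mg + 1 : Nat) : Int) = pvG v P (r + c) (mg : Int) := by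
        rw [hS mg, hfz (mg + 1)]
        omega
      have hfs : pvSpecB v P r = none := by simp [pvSpecB, hf]
      have hV' := hV; push_cast at hV'
      rw [hfs]
      simp [pvSpecB, pvMerge, hL, hV']
    | some mf =>
      obtain ⟨hf1, hf2⟩ := (pvLeastK_some_iff v P r mf).mp hf
      have hfs : pvSpecB v P r = some ((mf : Int), (pvG v P r (mf : Int) : Int)) := by
        simp [pvSpecB, hf]
      rcases Nat.lt_trichotomy (mg + 1) mf with hcmp | hcmp | hcmp
      · -- mg + 1 < mf : the new minimum is mg + 1 with g's count
        have hL : pvLeastK v (P ++ [c]) r = some (mg + 1) := by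
          refine (pvLeastK_some_iff v (P ++ [c]) r (mg + 1)).mpr ⟨?_, ?_⟩
          · rw [hS mg, hf2 (mg + 1) hcmp]; omega
          · intro j hj
            cases j with
            | zero => rw [h0]; exact hf2 0 (by omega)
            | succ jj => rw [hS jj, hf2 (jj + 1) (by omega), hg2 jj (by omega)]
        have hV : pvG v (P ++ [c]) r ((mg + 1 : Nat) : Int) = pvG v P (r + c) (mg : Int) := by
          rw [hS mg, hf2 (mg + 1) hcmp]
          omega
        have hmrg : pvMerge (some ((mf : Int), (pvG v P r (mf : Int) : Int)))
            ((mg : Int) + 1, (pvG v P (r + c) (mg : Int) : Int))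
            = ((mg : Int) + 1, (pvG v P (r + c) (mg : Int) : Int)) := by
          have hlt : (mg : Int) + 1 < (mf : Int) := by omega
          simp [pvMerge, hlt]
        have hV' := hV; push_cast at hV'
        rw [hfs]
        simp [pvSpecB, hL, hV', hmrg]
      · -- mg + 1 = mf : counts add
        have hL : pvLeastK v (P ++ [c]) r = some mf := by
          refine (pvLeastK_some_iff v (P ++ [c]) r mf).mpr ⟨?_, ?_⟩
          · rw [← hcmp, hS mg]; omega
          · intro j hj
            cases j with
            | zero => rw [h0]; exact hf2 0 (by omega)
            | succ jj => rw [hS jj, hf2 (jj + 1) (by omega), hg2 jj (by omega)]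
        have hV : pvG v (P ++ [c]) r ((mf : Nat) : Int)
            = pvG v P r (mf : Int) + pvG v P (r + c) (mg : Int) := by
          rw [← hcmp, hS mg]
        have hmrg : pvMerge (some ((mf : Int), (pvG v P r (mf : Int) : Int)))
            ((mg : Int) + 1, (pvG v P (r + c) (mg : Int) : Int))
            = ((mf : Int), (pvG v P r (mf : Int) : Int) + (pvG v P (r + c) (mg : Int) : Int)) := by
          have heq : (mg : Int) + 1 = (mf : Int) := by omega
          simp [pvMerge, heq]
        have hV' := hV; push_cast at hV'
        rw [hfs]
        simp [pvSpecB, hL, hV', hmrg]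
      · -- mf < mg + 1 : the old minimum stays with its count
        have hVf : pvG v (P ++ [c]) r ((mf : Nat) : Int) = pvG v P r (mf : Int) := by
          cases hmf : mf with
          | zero => rw [← hmf, hmf, h0]
          | succ jj => rw [← hmf, hmf, hS jj, hg2 jj (by omega)]; omega
        have hL : pvLeastK v (P ++ [c]) r = some mf := by
          refine (pvLeastK_some_iff v (P ++ [c]) r mf).mpr ⟨?_, ?_⟩
          · rw [hVf]; exact hf1
          · intro j hj
            cases j with
            | zero => rw [h0]; exact hf2 0 (by omega)
            | succ jj => rw [hS jj, hf2 (jj + 1) (by omega), hg2 jj (by omega)]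
        have hmrg : pvMerge (some ((mf : Int), (pvG v P r (mf : Int) : Int)))
            ((mg : Int) + 1, (pvG v P (r + c) (mg : Int) : Int))
            = ((mf : Int), (pvG v P r (mf : Int) : Int)) := by
          have h1 : ¬((mg : Int) + 1 < (mf : Int)) := by omega
          have h2 : ¬((mg : Int) + 1 = (mf : Int)) := by omega
          simp [pvMerge, h1, h2]
        rw [hfs]
        simp [pvSpecB, hL, hVf, hmrg]

-- ---------- B side: pointwise characterisation of the inner loop ----------

theorem pvStepB_fold (c : Int) (I : List (Int × (Int × Int))) (b2 b : PySem.Dict Int (Int × Int))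
    (hnd : (I.map (fun it => it.1 - c)).Nodup)
    (hag : ∀ it ∈ I, b2.get? (it.1 - c) = b.get? (it.1 - c)) (q : Int) :
    ((I.foldl (fun b2 it =>
        let r2 := it.1 - c
        if 0 ≤ r2 then
          match b2.get? r2 with
          | some kc =>
            if it.2.1 + 1 < kc.1 then b2.insert r2 (it.2.1 + 1, it.2.2)
            else if it.2.1 + 1 == kc.1 then b2.insert r2 (kc.1, kc.2 + it.2.2)
            else b2
          | none => b2.insert r2 (it.2.1 + 1, it.2.2)
        else b2) b2).get? q)
      = match I.find? (fun it => decide (0 ≤ it.1 - c) && (it.1 - c == q)) with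
        | none => b2.get? q
        | some it => some (pvMerge (b.get? q) (it.2.1 + 1, it.2.2)) := by
  induction I generalizing b2 with
  | nil => simp
  | cons it I ih =>
    simp only [List.map_cons, List.nodup_cons] at hnd
    simp only [List.foldl_cons]
    by_cases hg : 0 ≤ it.1 - c
    · have hag0 : b2.get? (it.1 - c) = b.get? (it.1 - c) := hag it (List.mem_cons_self)
      -- the head step equals a single insert (or a no-op that stores the looked-up value)
      have key : ∀ x, ((if 0 ≤ it.1 - c then
            match b2.get? (it.1 - c) with
            | some kc =>
              if it.2.1 + 1 < kc.1 then b2.insert (it.1 - c) (it.2.1 + 1, it.2.2)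
              else if it.2.1 + 1 == kc.1 then b2.insert (it.1 - c) (kc.1, kc.2 + it.2.2)
              else b2
            | none => b2.insert (it.1 - c) (it.2.1 + 1, it.2.2)
          else b2).get? x)
          = if x = it.1 - c then some (pvMerge (b.get? (it.1 - c)) (it.2.1 + 1, it.2.2))
            else b2.get? x := by
        intro x
        rw [if_pos hg]
        cases hbg : b2.get? (it.1 - c) with
        | none =>
          rw [hag0] at hbg
          simp only [hbg, PySem.Dict.get?_insert, pvMerge]
        | some kc =>
          rw [hag0] at hbg
          simp only [hbg, pvMerge]
          by_cases h1 : it.2.1 + 1 < kc.1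
          · simp only [if_pos h1, PySem.Dict.get?_insert]
          · by_cases h2 : it.2.1 + 1 = kc.1
            · simp only [if_neg h1, if_pos (beq_iff_eq.mpr h2), if_pos h2, PySem.Dict.get?_insert]
            · have h2b : (it.2.1 + 1 == kc.1) = false := beq_eq_false_iff_ne.mpr h2
              simp only [if_neg h1, h2b, Bool.false_eq_true, if_false, if_neg h2]
              by_cases hx : x = it.1 - c
              · rw [if_pos hx, hx, hag0, hbg]
              · rw [if_neg hx]
      have hagtail : ∀ it' ∈ I, ((if 0 ≤ it.1 - c then
            match b2.get? (it.1 - c) with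
            | some kc =>
              if it.2.1 + 1 < kc.1 then b2.insert (it.1 - c) (it.2.1 + 1, it.2.2)
              else if it.2.1 + 1 == kc.1 then b2.insert (it.1 - c) (kc.1, kc.2 + it.2.2)
              else b2
            | none => b2.insert (it.1 - c) (it.2.1 + 1, it.2.2)
          else b2).get? (it'.1 - c)) = b.get? (it'.1 - c) := by
        intro it' hmem
        rw [key, if_neg (fun hcontra : it'.1 - c = it.1 - c =>
          hnd.1 (hcontra ▸ List.mem_map_of_mem hmem))]
        exact hag it' (List.mem_cons_of_mem _ hmem)
      rw [ih _ hnd.2 hagtail]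
      by_cases hq : it.1 - c = q
      · have hp : ((fun it => decide (0 ≤ it.1 - c) && (it.1 - c == q)) it) = true := by
          show (decide (0 ≤ it.1 - c) && (it.1 - c == q)) = true
          rw [decide_eq_true hg, beq_iff_eq.mpr hq, Bool.and_self]
        rw [List.find?_cons_of_pos (p := fun (it : Int × (Int × Int)) => decide (0 ≤ it.1 - c) && (it.1 - c == q)) hp]
        have hfind : I.find? (fun it => decide (0 ≤ it.1 - c) && (it.1 - c == q)) = none := by
          rw [List.find?_eq_none]
          intro it' hmem hp'
          simp only [Bool.and_eq_true, decide_eq_true_eq, beq_iff_eq] at hp'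
          apply hnd.1
          rw [hq, ← hp'.2]
          exact List.mem_map_of_mem hmem
        rw [hfind]
        rw [key, if_pos hq.symm, hq]
      · have hp : ((fun it => decide (0 ≤ it.1 - c) && (it.1 - c == q)) it) = false := by
          show (decide (0 ≤ it.1 - c) && (it.1 - c == q)) = false
          rw [beq_eq_false_iff_ne.mpr hq, Bool.and_false]
        rw [List.find?_cons_of_neg (p := fun (it : Int × (Int × Int)) => decide (0 ≤ it.1 - c) && (it.1 - c == q))
          (by rw [hp]; exact Bool.false_ne_true)]
        cases hfind : I.find? (fun it => decide (0 ≤ it.1 - c) && (it.1 - c == q)) with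
        | none => rw [key, if_neg (fun h => hq h.symm)]
        | some it' => rfl
    · have hp : ((fun it => decide (0 ≤ it.1 - c) && (it.1 - c == q)) it) = false := by
        show (decide (0 ≤ it.1 - c) && (it.1 - c == q)) = false
        rw [decide_eq_false hg, Bool.false_and]
      rw [List.find?_cons_of_neg (p := fun (it : Int × (Int × Int)) => decide (0 ≤ it.1 - c) && (it.1 - c == q))
        (by rw [hp]; exact Bool.false_ne_true)]
      rw [if_neg hg]
      exact ih _ hnd.2 (fun it' hmem => hag it' (List.mem_cons_of_mem _ hmem))

theorem pvStepB_get? (c : Int) (b : PySem.Dict Int (Int × Int)) (hnd : b.keys.Nodup) (q : Int) :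
    (pvStepB c b).get? q =
      if 0 ≤ q then
        match b.get? (q + c) with
        | none => b.get? q
        | some kc => some (pvMerge (b.get? q) (kc.1 + 1, kc.2))
      else b.get? q := by
  have hndT : (b.items.map (fun it => it.1 - c)).Nodup := by
    have : (b.items.map (fun it => it.1 - c)) = (b.items.map Prod.fst).map (· - c) := by
      rw [List.map_map]; rfl
    rw [this]
    exact (pvKeysEq b ▸ hnd).map (fun a b h => by omega)
  unfold pvStepB
  rw [pvStepB_fold c b.items b b hndT (fun _ _ => rfl) q]
  by_cases hq : 0 ≤ q
  · rw [if_pos hq]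
    have hpred : (fun (it : Int × (Int × Int)) => decide (0 ≤ it.1 - c) && (it.1 - c == q))
        = (fun (it : Int × (Int × Int)) => it.1 == q + c) := by
      funext a
      by_cases h : a.1 = q + c
      · have h1 : a.1 - c = q := by omega
        simp [h, hq]
      · have h1 : a.1 - c ≠ q := by omega
        rw [beq_eq_false_iff_ne.mpr h1, Bool.and_false, beq_eq_false_iff_ne.mpr h]
    rw [hpred, pvFindKey b hnd (q + c)]
    cases b.get? (q + c) with
    | none => rfl
    | some kc => rfl
  · rw [if_neg hq]
    have hfind : b.items.find? (fun it => decide (0 ≤ it.1 - c) && (it.1 - c == q)) = none := by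
      rw [List.find?_eq_none]
      intro a _ hp
      simp only [Bool.and_eq_true, decide_eq_true_eq, beq_iff_eq] at hp
      omega
    rw [hfind]

theorem pvStepB_nodup (c : Int) (b : PySem.Dict Int (Int × Int)) (h : b.keys.Nodup) :
    (pvStepB c b).keys.Nodup := by
  unfold pvStepB
  generalize b.items = I
  induction I generalizing b with
  | nil => exact h
  | cons it I ih =>
    simp only [List.foldl_cons]
    refine ih _ ?_
    split
    · split
      · split_ifs <;>
          first
            | exact PySem.Dict.nodup_keys_insert _ _ _ h
            | exact h
      · exact PySem.Dict.nodup_keys_insert _ _ _ h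
    · exact h

-- ---------- B side: loop invariant ----------

def pvInvB (v : Int) (done : List Int) (b : PySem.Dict Int (Int × Int)) : Prop :=
  b.keys.Nodup ∧ ∀ r : Int, b.get? r = pvSpecB v done r

theorem pvInvB_step (v : Int) (done : List Int) (b : PySem.Dict Int (Int × Int)) (c : Int)
    (h : pvInvB v done b) : pvInvB v (done ++ [c]) (pvStepB c b) := by
  obtain ⟨hnd, hget⟩ := h
  refine ⟨pvStepB_nodup c b hnd, ?_⟩
  intro r
  rw [pvStepB_get? c b hnd r]
  by_cases hr : 0 ≤ r
  · rw [if_pos hr, hget r, hget (r + c), pvSpecB_append v done c r hr]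
  · rw [if_neg hr, hget r, pvSpecB_append_neg v done c r hr]

theorem pvInvB_loop (v : Int) (L : List Int) :
    ∀ (done : List Int) (b : PySem.Dict Int (Int × Int)), pvInvB v done b →
      pvInvB v (done ++ L) (L.foldl (fun b c => pvStepB c b) b) := by
  induction L with
  | nil => intro done b h; simpa using h
  | cons c L ih =>
    intro done b h
    have h1 : pvInvB v (done ++ [c]) (pvStepB c b) := pvInvB_step v done b c h
    have := ih (done ++ [c]) (pvStepB c b) h1
    simpa [List.append_assoc] using this

theorem pvInvB_init (v : Int) : pvInvB v [] (PySem.Dict.empty.insert v (0, 1)) := by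
  refine ⟨PySem.Dict.nodup_keys_insert _ _ _ (by simp [pvKeysEq, PySem.Dict.empty]), ?_⟩
  intro r
  rw [PySem.Dict.get?_insert]
  unfold pvSpecB pvLeastK pvG pvGbase
  by_cases hrv : r = v
  · subst hrv
    simp [List.range_succ]
  · simp [hrv, List.range_succ, PySem.Dict.get?_empty]

-- ===== VERDICT (by name: the statement is the Claim_ definition above) =====
theorem get_nb_ways2_spec : Claim_equal_get_nb_ways2 := by
  intro v containers _ hpre
  obtain ⟨s0, hs0mem, hs0sum, hs0pref⟩ := hpre
  have hex : 0 < pvG v (PySem.List.sorted containers (fun x => x) false) 0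
      ((s0.length : Nat) : Int) :=
    (pvG_pos_iff v _ 0 _).mpr ⟨s0, List.mem_sublists.mp hs0mem, by omega, rfl, hs0pref⟩
  unfold Spec_get_nb_ways2
  have hA := pvInvA_loop v (PySem.List.sorted containers (fun x => x) false) []
    (PySem.Dict.counter [(v, 0)]) (pvInvA_init v)
  have hB := pvInvB_loop v (PySem.List.sorted containers (fun x => x) false) []
    (PySem.Dict.empty.insert v (0, 1)) (pvInvB_init v)
  rw [List.nil_append] at hA hB
  obtain ⟨hAnd, hAgetD, hAmem⟩ := hA
  obtain ⟨hBnd, hBget⟩ := hB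
  have hB0 := hBget 0
  have hzeros : ∀ y : Int,
      (y ∈ (((PySem.List.sorted containers (fun x => x) false).foldl
          (fun w c => pvStepA c w) (PySem.Dict.counter [(v, 0)])).keys.filter
            (fun p => p.1 == 0)).map (·.2))
      ↔ 0 < pvG v (PySem.List.sorted containers (fun x => x) false) 0 y := by
    intro y
    simp only [List.mem_map, List.mem_filter]
    constructor
    · rintro ⟨p, ⟨hpk, hp0⟩, rfl⟩
      have hm := (hAmem p).mp hpk
      have hp0' : p.1 = 0 := beq_iff_eq.mp hp0
      rw [← hp0']
      exact hm
    · intro hy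
      exact ⟨(0, y), ⟨(hAmem (0, y)).mpr hy, by simp⟩, rfl⟩
  cases hLK : pvLeastK v (PySem.List.sorted containers (fun x => x) false) 0 with
  | none =>
    have hz := (pvLeastK_none_iff v (PySem.List.sorted containers (fun x => x) false) 0).mp hLK
    exact absurd (hz s0.length) (by omega)
  | some m' =>
    obtain ⟨hm1, hm2⟩ := (pvLeastK_some_iff v (PySem.List.sorted containers (fun x => x) false) 0 m').mp hLK
    have hB0' : ((PySem.List.sorted containers (fun x => x) false).foldl
        (fun b c => pvStepB c b) (PySem.Dict.empty.insert v (0, 1))).get? 0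
        = some ((m' : Int), (pvG v (PySem.List.sorted containers (fun x => x) false) 0 (m' : Int) : Int)) := by
      rw [hB0]
      simp [pvSpecB, hLK]
    have hm'in : ((m' : Int)) ∈ (((PySem.List.sorted containers (fun x => x) false).foldl
        (fun w c => pvStepA c w) (PySem.Dict.counter [(v, 0)])).keys.filter
          (fun p => p.1 == 0)).map (·.2) := (hzeros (m' : Int)).mpr hm1
    cases hmin : PySem.List.min? ((((PySem.List.sorted containers (fun x => x) false).foldl
        (fun w c => pvStepA c w) (PySem.Dict.counter [(v, 0)])).keys.filter
          (fun p => p.1 == 0)).map (·.2)) (fun y => y) with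
    | none =>
      rw [PySem.List.min?_eq_none_iff] at hmin
      rw [hmin] at hm'in
      cases hm'in
    | some m =>
      have hmmem := PySem.List.min?_mem hmin
      have hmpos := (hzeros m).mp hmmem
      have hmle : m ≤ (m' : Int) := PySem.List.min?_isMin hmin _ hm'in
      have hm0 : 0 ≤ m := by
        by_contra hcon
        rw [pvG_k_neg v _ 0 m (by omega)] at hmpos
        omega
      have hmeq : m = (m' : Int) := by
        rcases lt_or_eq_of_le hmle with hlt | heq
        · exfalso
          have htn : m = ((m.toNat : Nat) : Int) := by omega
          have := hm2 m.toNat (by omega)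
          rw [← htn] at this
          omega
        · exact heq
      unfold get_nb_ways2 get_nb_ways2_alt
      simp only [hmin, hB0']
      rw [hAgetD (0, m), hmeq]
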